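-- pv_equiv track=rewrite | github.com/dallmi/Brightcove | Vbrick/01_fetch_analytics.py | convert_rows_for_csv
-- ===== SOURCE A (Python) =====
-- def convert_rows_for_csv(rows):
--     """
--     Convert DuckDB rows to CSV format (for backward compatibility).
--
--     Maps column names to match original CSV output.
--     """
--     csv_rows = []
--     for row in rows:
--         csv_row = {
--             'video_id': row.get('video_id'),
--             'title': row.get('title'),
--             'playbackUrl': row.get('playback_url'),
--             'duration': row.get('duration'),
--             'whenUploaded': row.get('when_uploaded'),
--             'lastViewed': row.get('last_viewed'),
--             'whenPublished': row.get('when_published'),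
--             'commentCount': row.get('comment_count'),
--             'score': row.get('score'),
--             'uploadedBy': row.get('uploaded_by'),
--             'tags': row.get('tags'),
--             'date': row.get('date'),
--             'views': row.get('views'),
--             'Desktop': row.get('device_desktop'),
--             'Mobile': row.get('device_mobile'),
--             'Other Device': row.get('device_other'),
--             'Chrome': row.get('browser_chrome'),
--             'Microsoft Edge': row.get('browser_edge'),
--             'Other Browser': row.get('browser_other'),
--         }
--         csv_rows.append(csv_row)
--     return csv_rows
-- ===== SOURCE B (Python) =====
-- # B: row-driven single pass — scan each row's items once, classify each DB key through a
-- # reverse DB->CSV index into a 'found' table, then emit the fixed column template (alternative).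
--
-- DB_TO_CSV = {
--     'video_id': 'video_id',
--     'title': 'title',
--     'playback_url': 'playbackUrl',
--     'duration': 'duration',
--     'when_uploaded': 'whenUploaded',
--     'last_viewed': 'lastViewed',
--     'when_published': 'whenPublished',
--     'comment_count': 'commentCount',
--     'score': 'score',
--     'uploaded_by': 'uploadedBy',
--     'tags': 'tags',
--     'date': 'date',
--     'views': 'views',
--     'device_desktop': 'Desktop',
--     'device_mobile': 'Mobile',
--     'device_other': 'Other Device',
--     'browser_chrome': 'Chrome',
--     'browser_edge': 'Microsoft Edge',
--     'browser_other': 'Other Browser',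
-- }
--
-- CSV_COLUMNS = ['video_id', 'title', 'playbackUrl', 'duration', 'whenUploaded',
--                'lastViewed', 'whenPublished', 'commentCount', 'score', 'uploadedBy',
--                'tags', 'date', 'views', 'Desktop', 'Mobile', 'Other Device',
--                'Chrome', 'Microsoft Edge', 'Other Browser']
--
-- def convert_rows_for_csv(rows):
--     out = []
--     for row in rows:
--         found = {}
--         for db_key, value in row.items():
--             csv_key = DB_TO_CSV.get(db_key)
--             if csv_key is not None and csv_key not in found:
--                 found[csv_key] = value
--         out.append({c: found.get(c) for c in CSV_COLUMNS})
--     return out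
-- ===== Notes on version B (the rewrite author's own statement) =====
-- stated objective: alternative
-- what changed: Inverted the traversal: instead of 19 per-row column-driven dict lookups, B scans each row's items once, classifying each DB key through a reverse DB->CSV index into a found-table (first occurrence wins), then emits the fixed column template from that table.
import Mathlib
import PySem

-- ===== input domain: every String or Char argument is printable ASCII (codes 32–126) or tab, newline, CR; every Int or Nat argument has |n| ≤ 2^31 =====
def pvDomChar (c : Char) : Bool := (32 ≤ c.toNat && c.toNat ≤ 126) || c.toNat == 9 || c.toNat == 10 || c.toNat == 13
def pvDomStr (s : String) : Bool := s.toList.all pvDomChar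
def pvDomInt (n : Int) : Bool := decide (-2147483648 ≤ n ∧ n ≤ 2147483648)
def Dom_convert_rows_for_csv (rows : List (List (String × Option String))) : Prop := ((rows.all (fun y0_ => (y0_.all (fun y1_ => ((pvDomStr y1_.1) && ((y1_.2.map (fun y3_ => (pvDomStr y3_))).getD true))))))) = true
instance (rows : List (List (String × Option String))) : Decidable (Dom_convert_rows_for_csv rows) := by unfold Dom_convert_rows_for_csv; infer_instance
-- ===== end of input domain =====

-- B inverts the traversal: one scan over each row's items classified through a reverse DB->CSV index,
-- then the fixed column template is emitted from the resulting found-table (alternative, same cost).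

-- ===== PORT A =====
-- row.get(k): first-match lookup in the association list, None if absent (exact for Python dict.get)
def rowGet (row : List (String × Option String)) (k : String) : Option String :=
  (List.lookup k row).getD none

def convert_rows_for_csv (rows : List (List (String × Option String))) : List (List (String × Option String)) :=
  rows.foldl (fun csv_rows row =>
    csv_rows ++ [[
      ("video_id", rowGet row "video_id"),
      ("title", rowGet row "title"),
      ("playbackUrl", rowGet row "playback_url"),
      ("duration", rowGet row "duration"),
      ("whenUploaded", rowGet row "when_uploaded"),
      ("lastViewed", rowGet row "last_viewed"),
      ("whenPublished", rowGet row "when_published"),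
      ("commentCount", rowGet row "comment_count"),
      ("score", rowGet row "score"),
      ("uploadedBy", rowGet row "uploaded_by"),
      ("tags", rowGet row "tags"),
      ("date", rowGet row "date"),
      ("views", rowGet row "views"),
      ("Desktop", rowGet row "device_desktop"),
      ("Mobile", rowGet row "device_mobile"),
      ("Other Device", rowGet row "device_other"),
      ("Chrome", rowGet row "browser_chrome"),
      ("Microsoft Edge", rowGet row "browser_edge"),
      ("Other Browser", rowGet row "browser_other")]]) []

-- ===== PORT B =====
def DB_TO_CSV : List (String × String) :=
  [("video_id", "video_id"), ("title", "title"), ("playback_url", "playbackUrl"),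
   ("duration", "duration"), ("when_uploaded", "whenUploaded"), ("last_viewed", "lastViewed"),
   ("when_published", "whenPublished"), ("comment_count", "commentCount"), ("score", "score"),
   ("uploaded_by", "uploadedBy"), ("tags", "tags"), ("date", "date"), ("views", "views"),
   ("device_desktop", "Desktop"), ("device_mobile", "Mobile"), ("device_other", "Other Device"),
   ("browser_chrome", "Chrome"), ("browser_edge", "Microsoft Edge"), ("browser_other", "Other Browser")]

def CSV_COLUMNS : List String :=
  ["video_id", "title", "playbackUrl", "duration", "whenUploaded", "lastViewed",
   "whenPublished", "commentCount", "score", "uploadedBy", "tags", "date", "views",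
   "Desktop", "Mobile", "Other Device", "Chrome", "Microsoft Edge", "Other Browser"]

-- one item of the row scan: classify db key, record first occurrence of its CSV slot
def stepFound (found : List (String × Option String)) (p : String × Option String) :
    List (String × Option String) :=
  match List.lookup p.1 DB_TO_CSV with
  | some c => if (List.lookup c found).isSome then found else found ++ [(c, p.2)]
  | none => found

def convert_rows_for_csv_alt (rows : List (List (String × Option String))) : List (List (String × Option String)) :=
  rows.map (fun row =>
    let found := row.foldl stepFound []
    CSV_COLUMNS.map (fun c => (c, (List.lookup c found).getD none)))

-- ===== PRECONDITION & SPEC =====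
def Spec_convert_rows_for_csv (rows : List (List (String × Option String))) (out : List (List (String × Option String))) : Prop := out = convert_rows_for_csv_alt rows
instance (rows : List (List (String × Option String))) (out : List (List (String × Option String))) : Decidable (Spec_convert_rows_for_csv rows out) := by unfold Spec_convert_rows_for_csv; infer_instance

-- ===== CLAIM (what is proved, stated in full; the proofs are below) =====
def Claim_equal_convert_rows_for_csv : Prop := ∀ (rows : List (List (String × Option String))), Dom_convert_rows_for_csv rows → Spec_convert_rows_for_csv rows (convert_rows_for_csv rows)

-- ===== LEMMAS AND PROOFS =====

theorem lookup_append_left {α β : Type} [BEq α] (l₁ l₂ : List (α × β)) (k : α)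
    (h : (List.lookup k l₁).isSome) : List.lookup k (l₁ ++ l₂) = List.lookup k l₁ := by
  induction l₁ with
  | nil => simp at h
  | cons p t ih =>
      by_cases hk : k == p.1
      · simp [List.lookup, hk]
      · simp only [List.lookup, List.cons_append, hk] at h ⊢
        exact ih h

theorem lookup_append_none {α β : Type} [BEq α] (l₁ l₂ : List (α × β)) (k : α)
    (h : List.lookup k l₁ = none) : List.lookup k (l₁ ++ l₂) = List.lookup k l₂ := by
  induction l₁ with
  | nil => simp
  | cons p t ih =>
      by_cases hk : k == p.1
      · simp [List.lookup, hk] at h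
      · simp only [List.lookup, List.cons_append, hk] at h ⊢
        exact ih h

-- invariant of the row scan: the found-table's entry for c is acc's, else the first d-entry of the row
theorem lookup_mem_of_eq_some {α β : Type} [BEq α] [LawfulBEq α]
    (l : List (α × β)) (k : α) (v : β) (h : List.lookup k l = some v) : (k, v) ∈ l := by
  induction l with
  | nil => simp at h
  | cons p t ih =>
      by_cases hk : k == p.1
      · simp only [List.lookup, hk, Option.some.injEq] at h
        have : k = p.1 := by simpa using hk
        subst this; subst h
        exact List.mem_cons_self
      · simp only [List.lookup, hk] at h
        exact List.mem_cons_of_mem _ (ih h)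

-- invariant of the row scan: the found-table's entry for c is acc's, else the first d-entry of the row
theorem foldl_stepFound_lookup (c d : String)
    (hcd : List.lookup d DB_TO_CSV = some c)
    (huniq : ∀ p ∈ DB_TO_CSV, p.2 = c → p.1 = d)
    (row : List (String × Option String)) :
    ∀ acc, List.lookup c (row.foldl stepFound acc) =
      ((List.lookup c acc).or (List.lookup d row)) := by
  induction row with
  | nil => intro acc; simp
  | cons p rest ih =>
      intro acc
      simp only [List.foldl_cons]
      rw [ih (stepFound acc p)]
      rcases hacc : List.lookup c acc with _ | v
      · by_cases hpd : p.1 = d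
        · have hstep : stepFound acc p = acc ++ [(c, p.2)] := by
            simp [stepFound, hpd, hcd, hacc]
          rw [hstep, lookup_append_none _ _ _ hacc]
          simp [List.lookup, hpd]
        · have hstep : List.lookup c (stepFound acc p) = none := by
            unfold stepFound
            rcases hl : List.lookup p.1 DB_TO_CSV with _ | c' <;> dsimp only
            · exact hacc
            · have hc' : c' ≠ c := by
                intro h; subst h
                exact hpd (huniq _ (lookup_mem_of_eq_some _ _ _ hl) rfl)
              by_cases hs : (List.lookup c' acc).isSome
              · rw [if_pos hs]; exact hacc
              · rw [if_neg hs, lookup_append_none _ _ _ hacc]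
                have : (c == c') = false := by simpa using Ne.symm hc'
                simp [List.lookup, this]
          rw [hstep]
          have hne : (d == p.1) = false := by
            simp [BEq.beq]; intro h; exact hpd h.symm
          simp [List.lookup, hne]
      · have hstep : List.lookup c (stepFound acc p) = some v := by
          unfold stepFound
          rcases List.lookup p.1 DB_TO_CSV with _ | c' <;> dsimp only
          · exact hacc
          · by_cases hs : (List.lookup c' acc).isSome
            · rw [if_pos hs]; exact hacc
            · rw [if_neg hs, lookup_append_left _ _ _ (by rw [hacc]; rfl)]
              exact hacc
        rw [hstep]
        simp

-- per CSV column: B's found-table lookup equals A's direct row.get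
theorem col_eq (c d : String)
    (hcd : List.lookup d DB_TO_CSV = some c)
    (huniq : ∀ p ∈ DB_TO_CSV, p.2 = c → p.1 = d)
    (row : List (String × Option String)) :
    (List.lookup c (row.foldl stepFound [])).getD none = rowGet row d := by
  rw [foldl_stepFound_lookup c d hcd huniq row []]
  simp [rowGet]

theorem row_eq (row : List (String × Option String)) :
    CSV_COLUMNS.map (fun c => (c, (List.lookup c (row.foldl stepFound [])).getD none)) =
    [("video_id", rowGet row "video_id"), ("title", rowGet row "title"),
     ("playbackUrl", rowGet row "playback_url"), ("duration", rowGet row "duration"),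
     ("whenUploaded", rowGet row "when_uploaded"), ("lastViewed", rowGet row "last_viewed"),
     ("whenPublished", rowGet row "when_published"), ("commentCount", rowGet row "comment_count"),
     ("score", rowGet row "score"), ("uploadedBy", rowGet row "uploaded_by"),
     ("tags", rowGet row "tags"), ("date", rowGet row "date"), ("views", rowGet row "views"),
     ("Desktop", rowGet row "device_desktop"), ("Mobile", rowGet row "device_mobile"),
     ("Other Device", rowGet row "device_other"), ("Chrome", rowGet row "browser_chrome"),
     ("Microsoft Edge", rowGet row "browser_edge"), ("Other Browser", rowGet row "browser_other")] := by
  simp only [CSV_COLUMNS, List.map]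
  rw [col_eq "video_id" "video_id" (by decide) (by decide),
      col_eq "title" "title" (by decide) (by decide),
      col_eq "playbackUrl" "playback_url" (by decide) (by decide),
      col_eq "duration" "duration" (by decide) (by decide),
      col_eq "whenUploaded" "when_uploaded" (by decide) (by decide),
      col_eq "lastViewed" "last_viewed" (by decide) (by decide),
      col_eq "whenPublished" "when_published" (by decide) (by decide),
      col_eq "commentCount" "comment_count" (by decide) (by decide),
      col_eq "score" "score" (by decide) (by decide),
      col_eq "uploadedBy" "uploaded_by" (by decide) (by decide),
      col_eq "tags" "tags" (by decide) (by decide),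
      col_eq "date" "date" (by decide) (by decide),
      col_eq "views" "views" (by decide) (by decide),
      col_eq "Desktop" "device_desktop" (by decide) (by decide),
      col_eq "Mobile" "device_mobile" (by decide) (by decide),
      col_eq "Other Device" "device_other" (by decide) (by decide),
      col_eq "Chrome" "browser_chrome" (by decide) (by decide),
      col_eq "Microsoft Edge" "browser_edge" (by decide) (by decide),
      col_eq "Other Browser" "browser_other" (by decide) (by decide)]

theorem convert_rows_for_csv_eq (rows : List (List (String × Option String))) :
    convert_rows_for_csv rows = convert_rows_for_csv_alt rows := by
  unfold convert_rows_for_csv convert_rows_for_csv_alt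
  induction rows using List.reverseRecOn with
  | nil => rfl
  | append_singleton xs x ih =>
      rw [List.foldl_append, List.map_append, ← ih]
      simp only [List.foldl_cons, List.foldl_nil, List.map_cons, List.map_nil]
      rw [row_eq x]

-- ===== VERDICT (by name: the statement is the Claim_ definition above) =====
theorem convert_rows_for_csv_spec : Claim_equal_convert_rows_for_csv := by
  intro rows _
  exact convert_rows_for_csv_eq rows
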